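-- pv_equiv track=rewrite | github.com/Henrique-zoo/Projeto-TR1 | src/transmissor/camada_fisica.py | manchester
-- ===== SOURCE A (Python) =====
-- def manchester(bit_stream: list[bool]) -> list[int]:
--     """
--     Realiza a modulação Manchester.
--     Codifica cada bit com o XOR entre o bit e o clock, alternando o clock a cada ciclo.
--     """
--     i: int = 0  # Índice do bit stream
--     clk: bool = 0  # Estado inicial do clock
--     dig_signal: list[int] = []  # Sinal digital gerado
--
--     while i < len(bit_stream):  # Enquanto não processar todos os bits
--         dig_signal.append(int(bit_stream[i] ^ clk))  # XOR do bit com o clock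
--         i += 1 * clk  # Incrementa o índice apenas quando o clock está em alta
--         clk = not clk  # Alterna o estado do clock
--     return dig_signal
-- ===== SOURCE B (Python) =====
-- def manchester(bit_stream: list[bool]) -> list[int]:
--     # Simpler: one pass per input bit, emitting both half-cycle samples at once.
--     return [v for b in bit_stream for v in (int(b), int(b ^ 1))]
-- ===== Notes on version B (the rewrite author's own statement) =====
-- stated objective: simpler
-- what changed: Replaces the clock/index-increment while loop (two iterations per bit, conditional index step) with a single flattened comprehension emitting both half-cycle samples per bit.
import Mathlib
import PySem

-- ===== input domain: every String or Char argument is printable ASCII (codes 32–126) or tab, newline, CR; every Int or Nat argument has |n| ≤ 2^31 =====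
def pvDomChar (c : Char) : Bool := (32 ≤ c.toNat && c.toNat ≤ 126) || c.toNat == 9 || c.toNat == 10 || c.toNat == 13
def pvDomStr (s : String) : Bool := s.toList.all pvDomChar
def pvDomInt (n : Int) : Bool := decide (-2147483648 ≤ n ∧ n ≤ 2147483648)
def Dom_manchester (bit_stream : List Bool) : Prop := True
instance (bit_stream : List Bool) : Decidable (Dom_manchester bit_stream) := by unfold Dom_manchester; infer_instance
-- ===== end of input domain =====

-- B replaces A's clock/index while loop with a single flattened per-bit comprehension (objective: simpler).


-- ===== PORT A =====
-- Literal port of A's while loop: state (i, clk), index advances only when clk is high.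
def manchesterLoop (bit_stream : List Bool) (i : Nat) (clk : Bool) : List Int :=
  if h : i < bit_stream.length then
    (if xor bit_stream[i] clk then (1 : Int) else 0) ::
      manchesterLoop bit_stream (i + (if clk then 1 else 0)) (!clk)
  else []
termination_by 2 * (bit_stream.length - i) + (if clk then 0 else 1)
decreasing_by
  cases clk <;> simp_all <;> omega

def manchester (bit_stream : List Bool) : List Int :=
  manchesterLoop bit_stream 0 false

-- ===== PORT B =====
def manchester_alt (bit_stream : List Bool) : List Int :=
  bit_stream.flatMap (fun b => [if b then (1 : Int) else 0, if xor b true then (1 : Int) else 0])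

-- ===== PRECONDITION & SPEC =====
def Spec_manchester (bit_stream : List Bool) (out : List Int) : Prop := out = manchester_alt bit_stream
instance (bit_stream : List Bool) (out : List Int) : Decidable (Spec_manchester bit_stream out) := by unfold Spec_manchester; infer_instance

-- ===== CLAIM (what is proved, stated in full; the proofs are below) =====
def Claim_equal_manchester : Prop := ∀ (bit_stream : List Bool), Dom_manchester bit_stream → Spec_manchester bit_stream (manchester bit_stream)

-- ===== LEMMAS AND PROOFS =====
-- Loop invariant: from index i with clk low, A's loop produces B's encoding of the suffix.
theorem manchesterLoop_eq_flatMap (n : Nat) :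
    ∀ (bs : List Bool) (i : Nat), bs.length - i = n →
      manchesterLoop bs i false
        = (bs.drop i).flatMap
            (fun b => [if b then (1 : Int) else 0, if xor b true then (1 : Int) else 0]) := by
  induction n with
  | zero =>
    intro bs i h
    rw [manchesterLoop]
    have hge : bs.length ≤ i := by omega
    simp [Nat.not_lt.mpr hge, List.drop_eq_nil_of_le hge]
  | succ n ih =>
    intro bs i h
    have hi : i < bs.length := by omega
    rw [manchesterLoop, manchesterLoop]
    have hdrop : bs.drop i = bs[i] :: bs.drop (i + 1) := List.drop_eq_getElem_cons hi
    simp only [hi, dif_pos, Bool.xor_false, Bool.not_false, Bool.not_true,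
      Bool.false_eq_true, if_false, Nat.add_zero, if_true]
    rw [ih bs (i + 1) (by omega)]
    conv_rhs => rw [hdrop]
    simp only [List.flatMap_cons, List.cons_append, List.nil_append, Bool.xor_true,
      Bool.not_eq_true']

-- ===== VERDICT (by name: the statement is the Claim_ definition above) =====
theorem manchester_spec : Claim_equal_manchester := by
  intro bs _
  unfold Spec_manchester manchester manchester_alt
  simpa using manchesterLoop_eq_flatMap bs.length bs 0 (by omega)
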